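-- pv_equiv track=rewrite | github.com/ShiNera01/Algorithm | 카카오/2019 카카오 개발자 겨울 인턴십/튜플.py | solution
-- ===== SOURCE A (Python) =====
-- def solution(s):
--     answer = []
--
--     array = []
--     number = 0
--     flag = 0
--
--     for i in range(1,len(s)-1):
--
--         if s[i] == "{":
--             number_list = []
--             flag = 1
--
--         elif s[i].isdigit():
--             number = number * 10 + int(s[i])
--
--         elif s[i] == "," and flag == 1:
--             number_list.append(number)
--             number = 0
--
--         elif s[i] == "}":
--             number_list.append(number)
--             array.append(number_list)
--             number = 0
--             flag = 0
--
--
--     array = sorted(array, key = lambda x : len(x))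
--
--     for i in range(len(array)):
--         for j in range(len(array[i])):
--             if array[i][j] not in answer:
--                 answer.append(array[i][j])
--
--
--     return answer
-- ===== SOURCE B (Python) =====
-- def solution(s):
--     array = []
--     number = 0
--     flag = 0
--     for c in s[1:-1]:
--         if c == "{":
--             number_list = []
--             flag = 1
--         elif c.isdigit():
--             number = number * 10 + int(c)
--         elif c == "," and flag == 1:
--             number_list.append(number)
--             number = 0
--         elif c == "}":
--             number_list.append(number)
--             array.append(number_list)
--             number = 0
--             flag = 0
--     # decorate: stamp every occurrence with (set size, global position),
--     # keep the lexicographically smallest stamp per number, sort numbers by stamp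
--     best = {}
--     p = 0
--     for lst in array:
--         size = len(lst)
--         for x in lst:
--             k = (size, p)
--             if x not in best or k < best[x]:
--                 best[x] = k
--             p += 1
--     return sorted(best, key=lambda x: best[x])
-- ===== Notes on version B (the rewrite author's own statement) =====
-- stated objective: faster
-- what changed: Instead of A's length-keyed sort of the parsed sets followed by a quadratic `x not in answer` first-occurrence scan, B stamps every parsed occurrence with a (set size, global position) key, keeps the lexicographically minimal stamp per number in one dict pass, and returns the distinct numbers sorted by that stamp.
import Mathlib
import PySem

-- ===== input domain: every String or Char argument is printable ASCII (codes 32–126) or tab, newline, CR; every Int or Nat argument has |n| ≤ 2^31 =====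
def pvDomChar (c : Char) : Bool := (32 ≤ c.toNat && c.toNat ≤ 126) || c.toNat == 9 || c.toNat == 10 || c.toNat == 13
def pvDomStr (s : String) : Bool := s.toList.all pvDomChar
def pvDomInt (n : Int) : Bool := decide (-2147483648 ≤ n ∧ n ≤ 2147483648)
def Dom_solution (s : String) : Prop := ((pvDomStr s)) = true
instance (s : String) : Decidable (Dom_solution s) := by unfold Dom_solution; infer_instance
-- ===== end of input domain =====

-- B replaces A's length-sort of the parsed sets plus quadratic first-occurrence scan by a
-- decorate-and-sort strategy: every occurrence is stamped with a (set size, global position)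
-- key, a dict keeps the lexicographically minimal stamp per number, and the distinct numbers
-- are sorted by stamp (the character parse is shared). Equality is about the return value only.

-- ===== PORT A =====
-- One step of the character loop.  Hand-ported state machine:
-- Python's `number_list` is a mutable list that may already sit inside `array` (aliasing).
-- We model it exactly: `frozen` = contents of `array` entries no longer reachable through
-- `number_list`; `liveOcc` = how many times the current `number_list` object occurs at the
-- tail of `array`; `cur` = its contents (none while `number_list` is still unbound —
-- there Python's closing-brace branch raises UnboundLocalError, excluded by Pre_solution).
def pvStep (st : List (List Int) × Nat × Option (List Int) × Int × Int) (c : Char) :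
    List (List Int) × Nat × Option (List Int) × Int × Int :=
  match st with
  | (frozen, liveOcc, cur, number, flag) =>
    if c = '{' then
      (frozen ++ (match cur with | some l => List.replicate liveOcc l | none => []),
       0, some [], number, 1)
    else if PySem.Chars.isdigit c then
      (frozen, liveOcc, cur, number * 10 + ((c.toNat : Int) - 48), flag)  -- int(c) on a digit char
    else if c = ',' ∧ flag = 1 then
      (frozen, liveOcc, some (cur.getD [] ++ [number]), 0, flag)  -- flag = 1 ⇒ cur = some _
    else if c = '}' then
      match cur with
      | some l => (frozen, liveOcc + 1, some (l ++ [number]), 0, 0)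
      | none => st  -- Python raises UnboundLocalError here; outside Pre_solution
    else st

-- the final value of Python's `array`: frozen lists, then the live object's occurrences
def pvFinalArray (st : List (List Int) × Nat × Option (List Int) × Int × Int) :
    List (List Int) :=
  st.1 ++ (match st.2.2.1 with | some l => List.replicate st.2.1 l | none => [])

def solution (s : String) : List Int :=
  let cs := s.toList
  -- for i in range(1, len(s)-1): dispatch on s[i]  (index is always in range)
  let st := (PySem.List.pyRange 1 ((cs.length : Int) - 1) 1).foldl
    (fun st i => match PySem.List.pyGet? cs i with | some c => pvStep st c | none => st)
    ([], 0, none, 0, 0)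
  let array := pvFinalArray st
  -- array = sorted(array, key=lambda x: len(x))
  let array2 := PySem.List.sorted array (fun x => (x.length : Int))
  -- nested loops appending array[i][j] when not already in answer
  array2.foldl (fun answer lst =>
    lst.foldl (fun answer x => if answer.contains x then answer else answer ++ [x]) answer) []

-- ===== PORT B =====
-- Python's tuple comparison k < best[x] on two int pairs (exact lexicographic order)
def pvLexLtB (a b : Int × Int) : Bool := a.1 < b.1 || (a.1 == b.1 && a.2 < b.2)

-- body of Source B's inner loop: state (best, p); k = (size, p); keep the smaller stamp
def pvBInner (size : Int) (bp : PySem.Dict Int (Int × Int) × Int) (x : Int) :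
    PySem.Dict Int (Int × Int) × Int :=
  let k := (size, bp.2)
  (match bp.1.get? x with
   | none => bp.1.insert x k                                    -- x not in best
   | some kb => if pvLexLtB k kb then bp.1.insert x k else bp.1,
   bp.2 + 1)

-- body of Source B's outer loop: size = len(lst); for x in lst: …
def pvBOuter (bp : PySem.Dict Int (Int × Int) × Int) (lst : List Int) :
    PySem.Dict Int (Int × Int) × Int :=
  lst.foldl (pvBInner ((lst.length : Int))) bp

def solution_alt (s : String) : List Int :=
  -- for c in s[1:-1]: same dispatch as A (the parse is shared between Source A and Source B)
  let st := (PySem.List.slice s.toList (some 1) (some (-1))).foldl pvStep ([], 0, none, 0, 0)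
  let array := pvFinalArray st
  let best := (array.foldl pvBOuter (PySem.Dict.empty, 0)).1
  -- sorted(best, key=lambda x: best[x]): every x in best.keys is in the dict, so getD = best[x]
  PySem.List.sorted2 best.keys
    (fun x => (best.getD x (0, 0)).1) (fun x => (best.getD x (0, 0)).2)

-- ===== PRECONDITION & SPEC =====
-- Pre_ excludes exactly the strings whose body s[1:-1] shows a closing brace before any
-- opening brace: there Python's `number_list` is unbound and both A and B raise
-- UnboundLocalError.
def Pre_solution (s : String) : Prop :=
  '}' ∉ ((s.toList.drop 1).take (s.toList.length - 2)).takeWhile (fun c => c ≠ '{')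
instance (s : String) : Decidable (Pre_solution s) := by unfold Pre_solution; infer_instance

def pvWitness_solution : String := "{{2},{2,1},{2,1,3}}"

def Spec_solution (s : String) (out : List Int) : Prop := out = solution_alt s
instance (s : String) (out : List Int) : Decidable (Spec_solution s out) := by
  unfold Spec_solution; infer_instance

-- ===== CLAIM (what is proved, stated in full; the proofs are below) =====
def Claim_equal_solution : Prop :=
  ∀ (s : String), Dom_solution s → Pre_solution s → Spec_solution s (solution s)

-- ===== LEMMAS AND PROOFS =====

-- strict lexicographic order on int pairs, as a proposition
def pvLexLt (a b : Int × Int) : Prop := a.1 < b.1 ∨ (a.1 = b.1 ∧ a.2 < b.2)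

theorem pvLexLtB_iff (a b : Int × Int) : pvLexLtB a b = true ↔ pvLexLt a b := by
  unfold pvLexLtB pvLexLt
  simp

theorem pvLexLt_trans {a b c : Int × Int} (h1 : pvLexLt a b) (h2 : pvLexLt b c) :
    pvLexLt a c := by
  unfold pvLexLt at *
  omega

theorem pvLexLt_neg_trans {a b c : Int × Int} (h1 : ¬ pvLexLt a b) (h2 : ¬ pvLexLt b c) :
    ¬ pvLexLt a c := by
  unfold pvLexLt at *
  omega

-- (1) the two parse loops are the same fold: indices 1..len-2 versus the slice s[1:-1]
theorem pvFold_range_eq_drop_take (cs : List Char) (a k : Nat) (h : a + k ≤ cs.length)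
    (init : List (List Int) × Nat × Option (List Int) × Int × Int) :
    (PySem.List.pyRange (a : Int) ((a : Int) + (k : Int)) 1).foldl
      (fun st i => match PySem.List.pyGet? cs i with | some c => pvStep st c | none => st)
      init
    = ((cs.drop a).take k).foldl pvStep init := by
  induction k generalizing a init with
  | zero =>
    simp [PySem.List.pyRange_one_eq_nil]
  | succ k ih =>
    rw [show ((a : Int) + ((k : Nat) + 1 : Nat)) = ((a + 1 : Nat) : Int) + (k : Int) by push_cast; ring]
    rw [show ((a : Int)) = ((a : Nat) : Int) from rfl]
    rw [PySem.List.pyRange_one_cons (by push_cast; omega)]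
    have hlt : a < cs.length := by omega
    have hget : PySem.List.pyGet? cs (a : Int) = some cs[a] := by
      rw [PySem.List.pyGet?_natCast]; simp [hlt]
    have hdrop : cs.drop a = cs[a] :: cs.drop (a + 1) :=
      List.drop_eq_getElem_cons hlt
    rw [hdrop]
    simp only [List.take_succ_cons, List.foldl_cons, hget]
    exact ih (a + 1) (by omega) (pvStep init cs[a])

theorem pvParse_eq (cs : List Char)
    (init : List (List Int) × Nat × Option (List Int) × Int × Int) :
    (PySem.List.pyRange 1 ((cs.length : Int) - 1) 1).foldl
      (fun st i => match PySem.List.pyGet? cs i with | some c => pvStep st c | none => st)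
      init
    = (PySem.List.slice cs (some 1) (some (-1))).foldl pvStep init := by
  have hslice : PySem.List.slice cs (some 1) (some (-1)) = (cs.drop 1).take (cs.length - 2) := by
    rcases cs with _ | ⟨c, cs⟩
    · rfl
    · simp only [PySem.List.slice, PySem.List.clampIdx]
      norm_num
      split_ifs with h1
      all_goals simp_all
      all_goals (try congr 1) <;> omega
  rw [hslice]
  rcases Nat.lt_or_ge cs.length 2 with h2 | h2
  · rw [PySem.List.pyRange_one_eq_nil (by omega)]
    have h0 : cs.length - 2 = 0 := by omega
    simp [h0]
  · have h := pvFold_range_eq_drop_take cs 1 (cs.length - 2) (by omega) init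
    rw [show ((1 : Nat) : Int) + ((cs.length - 2 : Nat) : Int) = (cs.length : Int) - 1 by omega] at h
    simpa using h

-- (2) the occurrence annotation: each number stamped with (set size, global position)
def pvAnnL (L p : Int) : List Int → List ((Int × Int) × Int)
  | [] => []
  | x :: xs => ((L, p), x) :: pvAnnL L (p + 1) xs

def pvAnn (p : Int) : List (List Int) → List (List ((Int × Int) × Int))
  | [] => []
  | lst :: rest => pvAnnL ((lst.length : Int)) p lst :: pvAnn (p + (lst.length : Int)) rest

theorem pvAnnL_map_snd (L p : Int) (lst : List Int) :
    (pvAnnL L p lst).map (·.2) = lst := by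
  induction lst generalizing p with
  | nil => rfl
  | cons x xs ih => simp [pvAnnL, ih]

theorem pvAnnL_length (L p : Int) (lst : List Int) :
    (pvAnnL L p lst).length = lst.length := by
  induction lst generalizing p with
  | nil => rfl
  | cons x xs ih => simp [pvAnnL, ih]

theorem pvAnnL_fst (L p : Int) (lst : List Int) :
    ∀ q ∈ pvAnnL L p lst, q.1.1 = L := by
  induction lst generalizing p with
  | nil => simp [pvAnnL]
  | cons x xs ih =>
    intro q hq
    rcases List.mem_cons.mp hq with h | h
    · subst h; rfl
    · exact ih (p + 1) q h

theorem pvAnnL_pos_bounds (L p : Int) (lst : List Int) :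
    ∀ q ∈ pvAnnL L p lst, p ≤ q.1.2 ∧ q.1.2 < p + lst.length := by
  induction lst generalizing p with
  | nil => simp [pvAnnL]
  | cons x xs ih =>
    intro q hq
    rcases List.mem_cons.mp hq with h | h
    · subst h; simp
    · have := ih (p + 1) q h
      simp only [List.length_cons]
      push_cast
      omega

theorem pvAnnL_pairwise (L p : Int) (lst : List Int) :
    (pvAnnL L p lst).Pairwise (fun q r => q.1.2 < r.1.2) := by
  induction lst generalizing p with
  | nil => simp [pvAnnL]
  | cons x xs ih =>
    refine List.pairwise_cons.mpr ⟨?_, ih (p + 1)⟩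
    intro q hq
    exact ((pvAnnL_pos_bounds L (p + 1) xs q hq).1).trans_lt' (by simp)

theorem pvAnn_map (p : Int) (arr : List (List Int)) :
    (pvAnn p arr).map (List.map (·.2)) = arr := by
  induction arr generalizing p with
  | nil => rfl
  | cons lst rest ih => simp [pvAnn, pvAnnL_map_snd, ih]

-- all stamped positions in pvAnn p arr lie in [p, ∞)
theorem pvAnn_pos_lb (p : Int) (arr : List (List Int)) :
    ∀ l ∈ pvAnn p arr, ∀ q ∈ l, p ≤ q.1.2 := by
  induction arr generalizing p with
  | nil => simp [pvAnn]
  | cons lst rest ih =>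
    intro l hl q hq
    rcases List.mem_cons.mp hl with h | h
    · subst h; exact (pvAnnL_pos_bounds _ p lst q hq).1
    · have := ih (p + lst.length) l h q hq
      omega

def pvSep (l1 l2 : List ((Int × Int) × Int)) : Prop :=
  ∀ q ∈ l1, ∀ r ∈ l2, q.1.2 < r.1.2

theorem pvAnn_sep (p : Int) (arr : List (List Int)) :
    (pvAnn p arr).Pairwise pvSep := by
  induction arr generalizing p with
  | nil => simp [pvAnn]
  | cons lst rest ih =>
    refine List.pairwise_cons.mpr ⟨?_, ih (p + lst.length)⟩
    intro l hl q hq r hr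
    have h1 := (pvAnnL_pos_bounds _ p lst q hq).2
    have h2 := pvAnn_pos_lb (p + lst.length) rest l hl r hr
    omega

def pvGood (l : List ((Int × Int) × Int)) : Prop :=
  (∀ q ∈ l, q.1.1 = (l.length : Int)) ∧ l.Pairwise (fun q r => q.1.2 < r.1.2)

theorem pvAnn_good (p : Int) (arr : List (List Int)) :
    ∀ l ∈ pvAnn p arr, pvGood l := by
  induction arr generalizing p with
  | nil => simp [pvAnn]
  | cons lst rest ih =>
    intro l hl
    rcases List.mem_cons.mp hl with h | h
    · subst h
      refine ⟨?_, pvAnnL_pairwise _ p lst⟩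
      intro q hq
      rw [pvAnnL_length]
      exact pvAnnL_fst _ p lst q hq
    · exact ih (p + lst.length) l h

-- (3) sorting commutes with mapping a length-preserving function over the lists
theorem pvInsertBy_map {α β : Type} (f : β → α) (before : α → α → Bool)
    (before' : β → β → Bool) (hb : ∀ a b, before (f a) (f b) = before' a b)
    (b : β) (l : List β) :
    PySem.List.insertBy before (f b) (l.map f) = (PySem.List.insertBy before' b l).map f := by
  induction l with
  | nil => rfl
  | cons y ys ih =>
    simp only [List.map_cons, PySem.List.insertBy, hb]
    by_cases h : before' b y = true
    · simp [h]
    · simp only [Bool.not_eq_true] at h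
      simp [h, ih]

theorem pvSorted_map (T : List (List ((Int × Int) × Int))) :
    PySem.List.sorted (T.map (List.map (·.2))) (fun x => (x.length : Int))
    = (PySem.List.sorted T (fun x => (x.length : Int))).map (List.map (·.2)) := by
  rw [PySem.List.sorted_eq_foldl_insertBy, PySem.List.sorted_eq_foldl_insertBy]
  have key : ∀ acc, (T.map (List.map (·.2))).foldl
      (fun acc x => PySem.List.insertBy
        (fun a b => decide ((a.length : Int) < (b.length : Int))) x acc) (acc.map (List.map (·.2)))
      = (T.foldl (fun acc x => PySem.List.insertBy
          (fun a b => decide ((a.length : Int) < (b.length : Int))) x acc) acc).map (List.map (·.2)) := by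
    intro acc
    induction T generalizing acc with
    | nil => rfl
    | cons l T ih =>
      simp only [List.map_cons, List.foldl_cons]
      rw [pvInsertBy_map (List.map (·.2))
        (fun a b => decide ((a.length : Int) < (b.length : Int)))
        (fun a b => decide ((a.length : Int) < (b.length : Int)))
        (by intro a b; simp) l acc]
      exact ih _
  exact key []

-- (4) core stability fact: the flatten of sorted-by-length annotated sets is strictly
-- increasing in the lexicographic stamp order
def pvR (a b : List ((Int × Int) × Int)) : Prop :=
  (a.length : Int) ≤ b.length ∧ ((a.length : Int) = (b.length : Int) → pvSep a b)

theorem pvInsertBy_invariant (acc : List (List ((Int × Int) × Int)))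
    (l : List ((Int × Int) × Int))
    (hacc : acc.Pairwise pvR) (hsep : ∀ m ∈ acc, pvSep m l) :
    (PySem.List.insertBy (fun a b => decide ((a.length : Int) < (b.length : Int))) l acc).Pairwise pvR := by
  induction acc with
  | nil => simp [PySem.List.insertBy]
  | cons y ys ih =>
    obtain ⟨hy, hys⟩ := List.pairwise_cons.mp hacc
    show (if decide ((l.length : Int) < (y.length : Int)) = true then l :: y :: ys
        else y :: PySem.List.insertBy _ l ys).Pairwise pvR
    split_ifs with hlt
    · rw [decide_eq_true_eq] at hlt
      refine List.pairwise_cons.mpr ⟨?_, hacc⟩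
      intro m hm
      rcases List.mem_cons.mp hm with h | h
      · subst h; exact ⟨le_of_lt hlt, fun he => absurd he (ne_of_lt hlt)⟩
      · have := (hy m h).1
        exact ⟨by omega, fun he => absurd he (by omega)⟩
    · rw [decide_eq_true_eq] at hlt
      refine List.pairwise_cons.mpr ⟨?_, ?_⟩
      · intro m hm
        rcases (PySem.List.mem_insertBy _ _ _ _).mp hm with h | h
        · subst h
          exact ⟨by omega, fun _ => hsep y List.mem_cons_self⟩
        · exact hy m h
      · exact ih hys (fun m hm => hsep m (List.mem_cons_of_mem _ hm))

theorem pvFoldl_insert_pairwise (T : List (List ((Int × Int) × Int)))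
    (hsep : T.Pairwise pvSep) :
    ∀ acc, acc.Pairwise pvR → (∀ m ∈ acc, ∀ l ∈ T, pvSep m l) →
    (T.foldl (fun acc x => PySem.List.insertBy
        (fun a b => decide ((a.length : Int) < (b.length : Int))) x acc) acc).Pairwise pvR := by
  induction T with
  | nil => intro acc hacc _; exact hacc
  | cons l T ih =>
    intro acc hacc hcross
    obtain ⟨hl, hT⟩ := List.pairwise_cons.mp hsep
    simp only [List.foldl_cons]
    refine ih hT _ (pvInsertBy_invariant acc l hacc
      (fun m hm => hcross m hm l List.mem_cons_self)) ?_
    intro m hm l' hl'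
    rcases (PySem.List.mem_insertBy _ _ _ _).mp hm with h | h
    · subst h; exact hl l' hl'
    · exact hcross m h l' (List.mem_cons_of_mem _ hl')

theorem pvSorted_flatten_pairwise (T : List (List ((Int × Int) × Int)))
    (hgood : ∀ l ∈ T, pvGood l) (hsep : T.Pairwise pvSep) :
    ((PySem.List.sorted T (fun x => (x.length : Int))).flatten).Pairwise
      (fun q r => pvLexLt q.1 r.1) := by
  have hmem : ∀ l ∈ PySem.List.sorted T (fun x => (x.length : Int)), pvGood l := by
    intro l hl
    exact hgood l ((PySem.List.sorted_perm T _ false).mem_iff.mp hl)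
  have hpwR : (PySem.List.sorted T (fun x => (x.length : Int))).Pairwise pvR := by
    rw [PySem.List.sorted_eq_foldl_insertBy]
    exact pvFoldl_insert_pairwise T hsep [] (List.Pairwise.nil) (by simp)
  rw [List.pairwise_flatten]
  constructor
  · intro l hl
    obtain ⟨hfst, hpos⟩ := hmem l hl
    refine hpos.imp_of_mem ?_
    intro q r hq hr hlt
    exact Or.inr ⟨(hfst q hq).trans (hfst r hr).symm, hlt⟩
  · refine hpwR.imp_of_mem ?_
    intro a b ha hb hab q hq r hr
    obtain ⟨hle, heq⟩ := hab
    have hqa := (hmem a ha).1 q hq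
    have hrb := (hmem b hb).1 r hr
    rcases lt_or_eq_of_le hle with h | h
    · exact Or.inl (by omega)
    · exact Or.inr ⟨by omega, heq h q hq r hr⟩

-- (5) B's dict loop equals a fold of pvBStep over the annotated occurrence stream
def pvBStep (d : PySem.Dict Int (Int × Int)) (q : (Int × Int) × Int) :
    PySem.Dict Int (Int × Int) :=
  match d.get? q.2 with
  | none => d.insert q.2 q.1
  | some kb => if pvLexLtB q.1 kb then d.insert q.2 q.1 else d

theorem pvBInner_eq (lst : List Int) (L : Int) :
    ∀ (d : PySem.Dict Int (Int × Int)) (p : Int),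
    lst.foldl (pvBInner L) (d, p) = ((pvAnnL L p lst).foldl pvBStep d, p + lst.length) := by
  induction lst with
  | nil => intro d p; simp [pvAnnL]
  | cons x xs ih =>
    intro d p
    have hstep : pvBInner L (d, p) x = (pvBStep d ((L, p), x), p + 1) := rfl
    simp only [List.foldl_cons, pvAnnL, hstep, ih]
    refine Prod.ext rfl ?_
    simp only [List.length_cons]
    push_cast
    ring

theorem pvBOuter_eq (arr : List (List Int)) :
    ∀ (d : PySem.Dict Int (Int × Int)) (p : Int),
    arr.foldl pvBOuter (d, p)
      = (((pvAnn p arr).flatten).foldl pvBStep d, p + (arr.flatten.length : Int)) := by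
  induction arr with
  | nil => intro d p; simp [pvAnn]
  | cons lst rest ih =>
    intro d p
    simp only [List.foldl_cons, pvAnn, List.flatten_cons, List.foldl_append]
    rw [show pvBOuter (d, p) lst = ((pvAnnL ((lst.length : Int)) p lst).foldl pvBStep d,
          p + lst.length) from pvBInner_eq lst _ d p]
    rw [ih]
    refine Prod.ext rfl ?_
    simp only [List.length_append]
    push_cast
    ring

-- (6) the dict after the fold: keys and per-key minimal stamp
theorem pvBStep_keys (d : PySem.Dict Int (Int × Int)) (q : (Int × Int) × Int) :
    (pvBStep d q).keys = PySem.Set.add d.keys q.2 := by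
  have hcc : PySem.Set.contains d.keys q.2 = d.contains q.2 := by
    rcases hb : d.contains q.2 with _ | _
    · rw [Bool.eq_false_iff]
      intro hmem
      rw [PySem.Set.contains_iff, ← PySem.Dict.contains_iff_mem_keys] at hmem
      simp [hb] at hmem
    · rw [PySem.Set.contains_iff, ← PySem.Dict.contains_iff_mem_keys]
      exact hb
  unfold pvBStep PySem.Set.add
  rw [hcc]
  rcases hg : d.get? q.2 with _ | kb
  · have hc : d.contains q.2 = false := (PySem.Dict.get?_eq_none_iff_contains d q.2).mp hg
    rw [hc]
    simp only [Bool.false_eq_true, if_false]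
    exact PySem.Dict.keys_insert_of_not_contains d _ hc
  · have hc : d.contains q.2 = true := by
      rcases hb : d.contains q.2 with _ | _
      · rw [(PySem.Dict.get?_eq_none_iff_contains d q.2).mpr hb] at hg; cases hg
      · rfl
    rw [hc]
    simp only [if_true]
    show (if pvLexLtB q.1 kb = true then d.insert q.2 q.1 else d).keys = d.keys
    split_ifs with h
    · exact PySem.Dict.keys_insert_of_contains d _ hc
    · rfl

theorem pvBFold_keys (O : List ((Int × Int) × Int)) :
    ((O.foldl pvBStep PySem.Dict.empty).keys) = PySem.Set.ofList (O.map (·.2)) := by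
  rw [← PySem.Set.update_nil_left, PySem.Set.update_map_eq_foldl_add]
  have : ∀ (d : PySem.Dict Int (Int × Int)),
      (O.foldl pvBStep d).keys = O.foldl (fun s q => PySem.Set.add s q.2) d.keys := by
    induction O with
    | nil => intro d; rfl
    | cons q t ih =>
      intro d
      simp only [List.foldl_cons, ih, pvBStep_keys]
  rw [this PySem.Dict.empty]
  rfl

def pvBmin (o : Option (Int × Int)) (k : Int × Int) : Option (Int × Int) :=
  some (match o with | none => k | some m => if pvLexLtB k m then k else m)

theorem pvBFold_get? (O : List ((Int × Int) × Int)) :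
    ∀ (d : PySem.Dict Int (Int × Int)) (x : Int),
    (O.foldl pvBStep d).get? x
      = ((O.filter (fun q => q.2 == x)).map (·.1)).foldl pvBmin (d.get? x) := by
  induction O with
  | nil => intro d x; rfl
  | cons q t ih =>
    intro d x
    simp only [List.foldl_cons, List.filter_cons]
    by_cases hx : q.2 = x
    · have hq : (q.2 == x) = true := by simp [hx]
      simp only [hq, if_true, List.map_cons, List.foldl_cons, ih]
      congr 1
      show (pvBStep d q).get? x = pvBmin (d.get? x) q.1
      unfold pvBStep pvBmin
      rw [← hx]
      rcases hg : d.get? q.2 with _ | kb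
      · rw [PySem.Dict.get?_insert_self]
      · show (if pvLexLtB q.1 kb = true then d.insert q.2 q.1 else d).get? q.2 = _
        split_ifs with h
        · rw [PySem.Dict.get?_insert_self]; simp [h]
        · rw [hg]; simp [h]
    · have hq : (q.2 == x) = false := by simp [hx]
      simp only [hq, Bool.false_eq_true, if_false, ih]
      congr 1
      show (pvBStep d q).get? x = d.get? x
      unfold pvBStep
      rcases hg : d.get? q.2 with _ | kb
      · exact PySem.Dict.get?_insert_of_ne d q.1 (fun h => hx h.symm)
      · show (if pvLexLtB q.1 kb = true then d.insert q.2 q.1 else d).get? x = d.get? x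
        split_ifs with h
        · exact PySem.Dict.get?_insert_of_ne d q.1 (fun h => hx h.symm)
        · rfl

theorem pvMinfold_some (ks : List (Int × Int)) (m0 : Int × Int) :
    ∃ m, ks.foldl pvBmin (some m0) = some m ∧ (m ∈ ks ∨ m = m0)
      ∧ (∀ k ∈ ks, ¬ pvLexLt k m) ∧ ¬ pvLexLt m0 m := by
  induction ks generalizing m0 with
  | nil => exact ⟨m0, rfl, Or.inr rfl, by simp, by unfold pvLexLt; omega⟩
  | cons k t ih =>
    have hcons : (k :: t).foldl pvBmin (some m0)
        = t.foldl pvBmin (some (if pvLexLtB k m0 then k else m0)) := rfl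
    by_cases h : pvLexLtB k m0 = true
    · obtain ⟨m, hm, hmem, hlb, hm0⟩ := ih k
      refine ⟨m, by rw [hcons, if_pos h]; exact hm, ?_, ?_, ?_⟩
      · rcases hmem with h' | h'
        · exact Or.inl (List.mem_cons_of_mem _ h')
        · exact Or.inl (h' ▸ List.mem_cons_self)
      · intro k' hk'
        rcases List.mem_cons.mp hk' with h' | h'
        · subst h'; exact hm0
        · exact hlb k' h'
      · have hk : pvLexLt k m0 := (pvLexLtB_iff _ _).mp h
        intro hc
        exact hm0 (pvLexLt_trans hk hc)
    · obtain ⟨m, hm, hmem, hlb, hm0⟩ := ih m0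
      have hnk : ¬ pvLexLt k m0 := fun hc => h ((pvLexLtB_iff _ _).mpr hc)
      refine ⟨m, by rw [hcons, if_neg h]; exact hm, ?_, ?_, hm0⟩
      · rcases hmem with h' | h'
        · exact Or.inl (List.mem_cons_of_mem _ h')
        · exact Or.inr h'
      · intro k' hk'
        rcases List.mem_cons.mp hk' with h' | h'
        · subst h'; exact pvLexLt_neg_trans hnk hm0
        · exact hlb k' h'

-- combined: for x occurring in O, the dict holds the minimal stamp of x's occurrences
theorem pvBest_spec (O : List ((Int × Int) × Int)) (x : Int) (hx : x ∈ O.map (·.2)) :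
    ∃ m, (O.foldl pvBStep PySem.Dict.empty).get? x = some m
      ∧ (m, x) ∈ O ∧ (∀ q ∈ O, q.2 = x → ¬ pvLexLt q.1 m) := by
  have hklist : ∀ k, k ∈ (O.filter (fun q => q.2 == x)).map (·.1) ↔ (k, x) ∈ O := by
    intro k
    simp only [List.mem_map, List.mem_filter, beq_iff_eq]
    constructor
    · rintro ⟨⟨k', x'⟩, ⟨hmem, hx⟩, hk⟩
      simp only at hx hk
      subst hx; subst hk; exact hmem
    · intro hmem
      exact ⟨(k, x), ⟨hmem, rfl⟩, rfl⟩
  obtain ⟨q0, hq0, hq0x⟩ : ∃ q ∈ O, q.2 = x := by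
    rcases List.mem_map.mp hx with ⟨q, hq, hqx⟩
    exact ⟨q, hq, hqx⟩
  have hne : (O.filter (fun q => q.2 == x)).map (·.1) ≠ [] := by
    intro hnil
    have : q0.1 ∈ (O.filter (fun q => q.2 == x)).map (·.1) := by
      rw [hklist]
      rw [show (q0.1, x) = q0 from by rw [← hq0x]]
      exact hq0
    rw [hnil] at this
    exact List.not_mem_nil this
  rcases hks : (O.filter (fun q => q.2 == x)).map (·.1) with _ | ⟨k0, ks⟩
  · exact absurd hks hne
  obtain ⟨m, hm, hmem, hlb, hm0⟩ := pvMinfold_some ks k0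
  refine ⟨m, ?_, ?_, ?_⟩
  · rw [pvBFold_get? O PySem.Dict.empty x, hks]
    simpa [pvBmin] using hm
  · rw [← hklist, hks]
    rcases hmem with h' | h'
    · exact List.mem_cons_of_mem _ h'
    · subst h'; exact List.mem_cons_self
  · intro q hq hqx
    have : q.1 ∈ (O.filter (fun q => q.2 == x)).map (·.1) := by
      rw [hklist]
      rw [show (q.1, x) = q from by rw [← hqx]]
      exact hq
    rw [hks] at this
    rcases List.mem_cons.mp this with h' | h'
    · subst h'; exact hm0
    · exact hlb _ h'

-- (7) A's dedupe fold, pairwise in the minimal-stamp order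
theorem pvDedup_pairwise (l : List ((Int × Int) × Int)) (m : Int → Int × Int) :
    ∀ acc : List Int,
    l.Pairwise (fun q r => pvLexLt q.1 r.1) →
    (∀ q ∈ l, ¬ pvLexLt q.1 (m q.2)) →
    (∀ x, x ∈ l.map (·.2) → x ∉ acc → (m x, x) ∈ l) →
    (∀ a ∈ acc, ∀ q ∈ l, pvLexLt (m a) q.1) →
    acc.Pairwise (fun a b => pvLexLt (m a) (m b)) →
    ((l.map (·.2)).foldl
        (fun answer x => if answer.contains x then answer else answer ++ [x]) acc).Pairwise
      (fun a b => pvLexLt (m a) (m b)) := by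
  induction l with
  | nil => intro acc _ _ _ _ hacc; exact hacc
  | cons q t ih =>
    intro acc hpw hlow hatt hcross hacc
    obtain ⟨hqt, hpwt⟩ := List.pairwise_cons.mp hpw
    simp only [List.map_cons, List.foldl_cons]
    by_cases hc : acc.contains q.2 = true
    · rw [if_pos hc]
      have hqmem : q.2 ∈ acc := List.mem_of_elem_eq_true hc
      refine ih acc hpwt (fun q' hq' => hlow q' (List.mem_cons_of_mem _ hq')) ?_ ?_ hacc
      · intro x hx hxacc
        have h1 := hatt x (List.mem_cons_of_mem _ hx) hxacc
        rcases List.mem_cons.mp h1 with he | ht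
        · exfalso
          have : x = q.2 := congrArg Prod.snd he
          exact hxacc (this ▸ hqmem)
        · exact ht
      · intro a ha q' hq'
        exact pvLexLt_trans (hcross a ha q List.mem_cons_self) (hqt q' hq')
    · rw [if_neg hc]
      have hqnot : q.2 ∉ acc := fun hmem => hc (List.elem_eq_true_of_mem hmem)
      have hmq : m q.2 = q.1 := by
        have h1 : (m q.2, q.2) ∈ q :: t := by
          refine hatt q.2 ?_ hqnot
          exact List.mem_map.mpr ⟨q, List.mem_cons_self, rfl⟩
        rcases List.mem_cons.mp h1 with he | ht
        · exact congrArg Prod.fst he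
        · exact absurd (hqt _ ht) (hlow q List.mem_cons_self)
      refine ih (acc ++ [q.2]) hpwt (fun q' hq' => hlow q' (List.mem_cons_of_mem _ hq')) ?_ ?_ ?_
      · intro x hx hxacc
        have hxq : x ≠ q.2 := fun he => hxacc (by simp [he])
        have hxacc' : x ∉ acc := fun hmem => hxacc (by simp [hmem])
        have h1 := hatt x (List.mem_cons_of_mem _ hx) hxacc'
        rcases List.mem_cons.mp h1 with he | ht
        · exact absurd (congrArg Prod.snd he) hxq
        · exact ht
      · intro a ha q' hq'
        rcases List.mem_append.mp ha with h | h
        · exact pvLexLt_trans (hcross a h q List.mem_cons_self) (hqt q' hq')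
        · have : a = q.2 := by simpa using h
          rw [this, hmq]
          exact hqt q' hq'
      · rw [List.pairwise_append]
        refine ⟨hacc, by simp, ?_⟩
        intro a ha b hb
        have : b = q.2 := by simpa using hb
        rw [this, hmq]
        exact hcross a ha q List.mem_cons_self

-- A's dedupe fold IS PySem.Set.ofList (first occurrences, in order)
theorem pvDedup_eq_ofList (l : List Int) (acc : List Int) :
    l.foldl (fun answer x => if answer.contains x then answer else answer ++ [x]) acc
      = l.foldl PySem.Set.add acc := by
  rfl

-- (8) sorted2 is characterised by any strictly lex-increasing rearrangement
theorem pvSorted2_eq_of_perm (xs ys : List Int) (k1 k2 : Int → Int)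
    (hperm : ys.Perm xs)
    (hpw : ys.Pairwise (fun a b => pvLexLt (k1 a, k2 a) (k1 b, k2 b))) :
    PySem.List.sorted2 xs k1 k2 = ys := by
  have hkey : PySem.List.sorted2 xs k1 k2
      = PySem.List.sorted (κ := Lex (Int × Int)) xs (fun x => toLex (k1 x, k2 x)) := by
    simp only [PySem.List.sorted2, PySem.List.sorted]
    have hb : (fun a b => decide (k1 a < k1 b) || (!decide (k1 b < k1 a) && decide (k2 a < k2 b)))
        = (fun a b => decide ((toLex (k1 a, k2 a) : Lex (Int × Int)) < toLex (k1 b, k2 b))) := by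
      funext a b
      rw [Bool.eq_iff_iff]
      simp [Prod.Lex.lt_iff]
      omega
    simp only [if_neg (by decide : ¬ (false = true))]
    rw [hb]
  rw [hkey]
  apply PySem.List.sorted_eq_of_perm_of_pairwise_lt xs ys _ hperm
  refine hpw.imp ?_
  intro a b h
  rw [Prod.Lex.lt_iff]
  exact h

-- (9) final assembly: phase 2 of A equals phase 2 of B on any parsed array
theorem pvPhase2_eq (array : List (List Int)) :
    (PySem.List.sorted array (fun x => (x.length : Int))).foldl
      (fun answer lst =>
        lst.foldl (fun answer x => if answer.contains x then answer else answer ++ [x]) answer) []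
    = PySem.List.sorted2 ((array.foldl pvBOuter (PySem.Dict.empty, 0)).1).keys
        (fun x => (((array.foldl pvBOuter (PySem.Dict.empty, 0)).1).getD x (0, 0)).1)
        (fun x => (((array.foldl pvBOuter (PySem.Dict.empty, 0)).1).getD x (0, 0)).2) := by
  have hbest : (array.foldl pvBOuter (PySem.Dict.empty, 0)).1
      = ((pvAnn 0 array).flatten).foldl pvBStep PySem.Dict.empty := by
    rw [pvBOuter_eq array PySem.Dict.empty 0]
  rw [hbest, ← List.foldl_flatten]
  have hflat : (PySem.List.sorted array (fun x => (x.length : Int))).flatten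
      = ((PySem.List.sorted (pvAnn 0 array) (fun x => (x.length : Int))).flatten).map (·.2) := by
    conv_lhs => rw [← pvAnn_map 0 array]
    rw [pvSorted_map, ← List.map_flatten]
  rw [hflat]
  -- notation for this proof
  have hPerm : ((PySem.List.sorted (pvAnn 0 array) (fun x => (x.length : Int))).flatten).Perm
      ((pvAnn 0 array).flatten) := (PySem.List.sorted_perm (pvAnn 0 array) _ false).flatten
  have hPpw := pvSorted_flatten_pairwise (pvAnn 0 array) (pvAnn_good 0 array) (pvAnn_sep 0 array)
  have hm : ∀ x, x ∈ ((pvAnn 0 array).flatten).map (·.2) →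
      ∃ mk, ((((pvAnn 0 array).flatten).foldl pvBStep PySem.Dict.empty).getD x (0, 0)) = mk
        ∧ (mk, x) ∈ (pvAnn 0 array).flatten
        ∧ (∀ q ∈ (pvAnn 0 array).flatten, q.2 = x → ¬ pvLexLt q.1 mk) := by
    intro x hx
    obtain ⟨mk, hget, hmem, hlb⟩ := pvBest_spec ((pvAnn 0 array).flatten) x hx
    exact ⟨mk, by rw [PySem.Dict.getD_eq_get?_getD, hget]; rfl, hmem, hlb⟩
  symm
  apply pvSorted2_eq_of_perm
  · -- the deduped A-answer is a permutation of the dict's keys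
    rw [pvDedup_eq_ofList, pvBFold_keys]
    show (PySem.Set.ofList _).Perm (PySem.Set.ofList _)
    apply List.perm_of_nodup_nodup_toFinset_eq (PySem.Set.nodup_ofList _) (PySem.Set.nodup_ofList _)
    ext x
    simp only [List.mem_toFinset, PySem.Set.mem_ofList]
    exact (hPerm.map (·.2)).mem_iff
  · -- and it is strictly increasing in the minimal-stamp order
    refine pvDedup_pairwise _ _ [] hPpw ?_ ?_ (by simp) List.Pairwise.nil
    · intro q hq
      have hqO : q ∈ (pvAnn 0 array).flatten := hPerm.mem_iff.mp hq
      obtain ⟨mk, hget, _, hlb⟩ := hm q.2 (List.mem_map.mpr ⟨q, hqO, rfl⟩)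
      show ¬ pvLexLt q.1 _
      rw [hget]
      exact hlb q hqO rfl
    · intro x hx _
      obtain ⟨mk, hget, hmem, _⟩ := hm x ((hPerm.map (·.2)).mem_iff.mp hx)
      show (_, x) ∈ _
      rw [hget]
      exact hPerm.mem_iff.mpr hmem

-- ===== VERDICT (by name: the statement is the Claim_ definition above) =====
theorem solution_spec : Claim_equal_solution := by
  intro s _ _
  unfold Spec_solution
  simp only [solution, solution_alt]
  rw [pvParse_eq]
  exact pvPhase2_eq _
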